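-- pv_equiv track=rewrite | github.com/LambertAlpha/garden-of-peony-pavilion | phase1_water.py | expand_polygon_outline
-- ===== SOURCE A (Python) =====
-- def expand_polygon_outline(polygon, inside_set):
--     """找到多边形内部格子的外扩1格——即不在 inside_set 中、但与 inside_set 相邻的格子"""
--     outline = set()
--     for (x, z) in inside_set:
--         for dx, dz in [(-1, 0), (1, 0), (0, -1), (0, 1)]:
--             nx, nz = x + dx, z + dz
--             if (nx, nz) not in inside_set:
--                 outline.add((nx, nz))
--     return outline
-- ===== SOURCE B (Python) =====
-- def expand_polygon_outline(polygon, inside_set):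
--     """找到多边形内部格子的外扩1格——即不在 inside_set 中、但与 inside_set 相邻的格子"""
--     # Edge-cancellation: record every directed step (cell, neighbour); a step leads
--     # outside exactly when the reverse step was never generated (the direction set
--     # is symmetric, so the reverse step exists iff the neighbour is itself inside).
--     dirs = [(-1, 0), (1, 0), (0, -1), (0, 1)]
--     edges = {((x, z), (x + dx, z + dz)) for (x, z) in inside_set for dx, dz in dirs}
--     return {n for (p, n) in edges if (n, p) not in edges}
-- ===== Notes on version B (the rewrite author's own statement) =====
-- stated objective: alternative
-- what changed: B never tests membership in inside_set: it builds the set of directed steps (cell, neighbour) and emits a neighbour exactly when the reverse step is absent, exploiting the symmetry of the 4-direction stencil (reverse step present iff the neighbour is inside).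
import Mathlib
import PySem

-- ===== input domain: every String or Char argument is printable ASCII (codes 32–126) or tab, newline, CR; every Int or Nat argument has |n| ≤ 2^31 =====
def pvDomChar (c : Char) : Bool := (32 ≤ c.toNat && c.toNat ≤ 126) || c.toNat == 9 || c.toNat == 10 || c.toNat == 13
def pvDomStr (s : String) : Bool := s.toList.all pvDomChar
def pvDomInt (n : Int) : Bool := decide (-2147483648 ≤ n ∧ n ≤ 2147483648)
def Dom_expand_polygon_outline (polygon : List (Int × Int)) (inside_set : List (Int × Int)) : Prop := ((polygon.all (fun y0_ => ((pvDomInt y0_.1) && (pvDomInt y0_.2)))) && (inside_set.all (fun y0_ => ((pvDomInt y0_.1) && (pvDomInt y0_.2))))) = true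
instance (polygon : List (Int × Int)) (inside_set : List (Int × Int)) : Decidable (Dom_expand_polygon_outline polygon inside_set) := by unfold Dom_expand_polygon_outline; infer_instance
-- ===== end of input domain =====

-- B replaces A's membership test against inside_set by edge cancellation: it builds the set of
-- directed steps (cell, neighbour) and keeps a neighbour exactly when the reverse step is absent
-- (objective: alternative algorithm; no speed claimed).


-- ===== PORT A =====
-- Port of A: scan inside_set, test each of the 4 neighbours for membership in inside_set, add if outside.
def expand_polygon_outline (polygon : List (Int × Int)) (inside_set : List (Int × Int)) : List (Int × Int) :=
  inside_set.foldl (fun outline p =>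
    [((-1 : Int), (0 : Int)), (1, 0), (0, -1), (0, 1)].foldl (fun o d =>
      let n : Int × Int := (p.1 + d.1, p.2 + d.2)
      if PySem.Set.contains inside_set n then o else PySem.Set.add o n) outline)
    PySem.Set.empty

-- ===== PORT B =====
-- Port of B: the set of directed steps (cell, neighbour); then one comprehension over it keeping
-- each neighbour whose reverse step is absent.
def pvDirs : List (Int × Int) := [(-1, 0), (1, 0), (0, -1), (0, 1)]

def pvEdges (inside_set : List (Int × Int)) : PySem.Set ((Int × Int) × (Int × Int)) :=
  PySem.Set.ofList (inside_set.flatMap (fun p =>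
    pvDirs.map (fun d => (p, (p.1 + d.1, p.2 + d.2)))))

def expand_polygon_outline_alt (polygon : List (Int × Int)) (inside_set : List (Int × Int)) : List (Int × Int) :=
  let edges := pvEdges inside_set
  edges.foldl (fun out e =>
    if PySem.Set.contains edges (e.2, e.1) then out else PySem.Set.add out e.2)
    PySem.Set.empty

-- ===== PRECONDITION & SPEC =====
def Spec_expand_polygon_outline (polygon : List (Int × Int)) (inside_set : List (Int × Int)) (out : List (Int × Int)) : Prop := out = expand_polygon_outline_alt polygon inside_set
instance (polygon : List (Int × Int)) (inside_set : List (Int × Int)) (out : List (Int × Int)) : Decidable (Spec_expand_polygon_outline polygon inside_set out) := by unfold Spec_expand_polygon_outline; infer_instance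

-- ===== CLAIM =====
def Claim_equal_expand_polygon_outline : Prop := ∀ (polygon : List (Int × Int)) (inside_set : List (Int × Int)), Dom_expand_polygon_outline polygon inside_set → Spec_expand_polygon_outline polygon inside_set (expand_polygon_outline polygon inside_set)

-- ===== LEMMAS AND PROOFS =====

-- the common loop shape: conditionally add f e for each element e
def pvStep {α β : Type} [BEq β] (P : α → Bool) (f : α → β) (o : List β) (e : α) : List β :=
  if P e then o else PySem.Set.add o (f e)

theorem pvStep_mem {α β : Type} [BEq β] (P : α → Bool) (f : α → β) (o : List β) (e : α)
    {y : β} (h : y ∈ o) : y ∈ pvStep P f o e := by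
  unfold pvStep PySem.Set.add
  split
  · exact h
  · split
    · exact h
    · exact List.mem_append_left _ h

theorem pvStep_noop {α β : Type} [BEq β] [LawfulBEq β] (P : α → Bool) (f : α → β)
    (o : List β) (e : α) (h : P e = false → f e ∈ o) : pvStep P f o e = o := by
  unfold pvStep
  by_cases hP : P e = true
  · simp [hP]
  · have hm : f e ∈ o := h (Bool.eq_false_iff.mpr hP)
    simp [hP, PySem.Set.add, PySem.Set.contains, List.contains_eq_mem, hm]

-- dropping the duplicates of a single element a does not change the fold, provided a's effect is
-- already recorded in the accumulator
theorem pv_fold_filter {α β : Type} [BEq α] [LawfulBEq α] [BEq β] [LawfulBEq β]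
    (P : α → Bool) (f : α → β) (a : α) :
    ∀ (l : List α) (o : List β), (P a = false → f a ∈ o) →
      (l.filter (fun b => !(b == a))).foldl (pvStep P f) o = l.foldl (pvStep P f) o := by
  intro l
  induction l with
  | nil => intro o _; rfl
  | cons b l ih =>
    intro o h
    by_cases hba : (b == a) = true
    · have hb : b = a := by simpa using hba
      have hno : pvStep P f o b = o := by
        subst hb; exact pvStep_noop P f o b h
      simp only [List.filter_cons, hba, Bool.not_true, List.foldl_cons, hno]
      exact ih o h
    · have hba' : (b == a) = false := Bool.eq_false_iff.mpr hba
      simp only [List.filter_cons, hba', Bool.not_false, List.foldl_cons]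
      exact ih (pvStep P f o b) (fun hP => pvStep_mem P f o b (h hP))

-- folding the conditional-add step over set(l) equals folding it over l
theorem pv_fold_ofList {α β : Type} [BEq α] [LawfulBEq α] [BEq β] [LawfulBEq β]
    (P : α → Bool) (f : α → β) :
    ∀ (l : List α) (o : List β),
      (PySem.Set.ofList l).foldl (pvStep P f) o = l.foldl (pvStep P f) o := by
  intro l
  induction l with
  | nil => intro o; rfl
  | cons a l ih =>
    intro o
    rw [PySem.Set.ofList_cons]
    simp only [List.foldl_cons]
    have hmem : P a = false → f a ∈ pvStep P f o a := by
      intro hP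
      simp [pvStep, hP, PySem.Set.mem_add]
    calc ((PySem.Set.ofList l).discard a).foldl (pvStep P f) (pvStep P f o a)
        = ((PySem.Set.ofList l).filter (fun b => !(b == a))).foldl (pvStep P f) (pvStep P f o a) := rfl
      _ = (PySem.Set.ofList l).foldl (pvStep P f) (pvStep P f o a) :=
          pv_fold_filter P f a (PySem.Set.ofList l) (pvStep P f o a) hmem
      _ = l.foldl (pvStep P f) (pvStep P f o a) := ih (pvStep P f o a)

-- the reverse step (n, p) of a generated step (p, n) is itself generated iff n is inside
theorem pv_rev_mem (inside_set : List (Int × Int)) (p d : Int × Int)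
    (hd : d ∈ pvDirs) :
    (((p.1 + d.1, p.2 + d.2), p) ∈
        inside_set.flatMap (fun q => pvDirs.map (fun d' => (q, (q.1 + d'.1, q.2 + d'.2)))))
      ↔ (p.1 + d.1, p.2 + d.2) ∈ inside_set := by
  constructor
  · intro h
    rcases List.mem_flatMap.mp h with ⟨q, hq, hmap⟩
    rcases List.mem_map.mp hmap with ⟨d', _, heq⟩
    simp only [Prod.mk.injEq] at heq
    exact heq.1 ▸ hq
  · intro hn
    refine List.mem_flatMap.mpr ⟨(p.1 + d.1, p.2 + d.2), hn, List.mem_map.mpr ⟨(-d.1, -d.2), ?_, ?_⟩⟩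
    · fin_cases hd <;> decide
    · ext <;> simp
  
-- ===== VERDICT =====
theorem expand_polygon_outline_spec : Claim_equal_expand_polygon_outline := by
  intro polygon inside_set _
  unfold Spec_expand_polygon_outline expand_polygon_outline expand_polygon_outline_alt pvEdges
  -- name the stream of directed steps
  set S : List ((Int × Int) × (Int × Int)) :=
    inside_set.flatMap (fun p => pvDirs.map (fun d' => (p, (p.1 + d'.1, p.2 + d'.2)))) with hS
  -- B side: fold over set(S) = fold over S, then the reverse-step test = the membership test
  have hB :
      (PySem.Set.ofList S).foldl
        (fun out e => if PySem.Set.contains (PySem.Set.ofList S) (e.2, e.1) then out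
                      else PySem.Set.add out e.2) PySem.Set.empty
        = S.foldl (fun out e => if PySem.Set.contains inside_set e.2 then out
                      else PySem.Set.add out e.2) PySem.Set.empty := by
    have h1 := pv_fold_ofList
      (fun e : (Int × Int) × (Int × Int) => PySem.Set.contains (PySem.Set.ofList S) (e.2, e.1))
      (fun e => e.2) S PySem.Set.empty
    unfold pvStep at h1
    rw [h1]
    apply PySem.List.foldl_congr_mem
    intro acc e he
    rcases List.mem_flatMap.mp he with ⟨p, hp, hmap⟩
    rcases List.mem_map.mp hmap with ⟨d, hd, heq⟩
    subst heq
    have hcond : PySem.Set.contains (PySem.Set.ofList S)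
        (((p.1 + d.1, p.2 + d.2) : Int × Int), p)
        = PySem.Set.contains inside_set ((p.1 + d.1, p.2 + d.2) : Int × Int) := by
      have hiff := pv_rev_mem inside_set p d hd
      simp only [PySem.Set.contains, List.contains_eq_mem, PySem.Set.mem_ofList]
      rw [hS]
      exact decide_eq_decide.mpr hiff
    simp only [hcond]
  rw [hB]
  -- A side: flatten the nested fold into a fold over S via map snd
  have hA :
      inside_set.foldl (fun outline p =>
        [((-1 : Int), (0 : Int)), (1, 0), (0, -1), (0, 1)].foldl (fun o d =>
          let n : Int × Int := (p.1 + d.1, p.2 + d.2)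
          if PySem.Set.contains inside_set n then o else PySem.Set.add o n) outline)
        PySem.Set.empty
      = S.foldl (fun out e => if PySem.Set.contains inside_set e.2 then out
                      else PySem.Set.add out e.2) PySem.Set.empty := by
    rw [hS, List.foldl_flatMap]
    simp only [pvDirs]
    apply PySem.List.foldl_congr_mem
    intro acc p _
    simp only [List.foldl_map]
  rw [hA]
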